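-- pv_equiv track=rewrite | github.com/godfredO/dsa | generate_document.py | generateDocumentII
-- ===== SOURCE A (Python) =====
-- def countCharacterFrequency(character,target):
--     frequency = 0
--     for char in target:
--         if char == character:
--             frequency += 1
--     return frequency
--
-- def generateDocumentII(characters,document):
--     alreadyCounted = set()
--
--     for character in document:
--         if character in alreadyCounted:
--             continue
--
--         documentFrequency = countCharacterFrequency(character,document)
--         charactersFrequency = countCharacterFrequency(character,characters)
--
--         if documentFrequency > charactersFrequency:
--             return False
--
--         alreadyCounted.add(character)
--     return True
-- ===== SOURCE B (Python) =====
-- def generateDocumentII(characters, document):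
--     available = {}
--     for c in characters:
--         available[c] = available.get(c, 0) + 1
--     needed = {}
--     for c in document:
--         needed[c] = needed.get(c, 0) + 1
--     for c, cnt in needed.items():
--         if cnt > available.get(c, 0):
--             return False
--     return True
-- ===== Notes on version B (the rewrite author's own statement) =====
-- stated objective: alternative
-- what changed: B builds one frequency table per string in a single pass and compares the document table's entries against the characters table, replacing A's outer document loop with a dedup set and two full rescans per distinct character.
import Mathlib
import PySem

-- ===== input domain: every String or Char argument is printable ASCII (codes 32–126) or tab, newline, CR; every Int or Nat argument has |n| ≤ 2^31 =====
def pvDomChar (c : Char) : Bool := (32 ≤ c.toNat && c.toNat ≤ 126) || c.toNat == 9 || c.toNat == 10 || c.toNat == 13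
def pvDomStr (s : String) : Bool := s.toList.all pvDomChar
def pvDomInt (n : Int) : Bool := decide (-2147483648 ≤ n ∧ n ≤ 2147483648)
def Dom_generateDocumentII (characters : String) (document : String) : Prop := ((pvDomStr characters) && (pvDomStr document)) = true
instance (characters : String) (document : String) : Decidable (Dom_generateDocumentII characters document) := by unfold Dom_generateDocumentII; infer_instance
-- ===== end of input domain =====

-- B builds a frequency table per string in one pass and compares the tables' entries,
-- replacing A's document loop + dedup set + repeated rescans (objective: alternative).

-- ===== PORT A =====
def countCharacterFrequency (character : Char) (target : List Char) : Int :=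
  target.foldl (fun frequency char => if char == character then frequency + 1 else frequency) 0

def generateDocumentIILoop (characters : List Char) (document : List Char) :
    List Char → PySem.Set Char → Bool
  | [], _ => true
  | character :: rest, alreadyCounted =>
    if PySem.Set.contains alreadyCounted character then
      generateDocumentIILoop characters document rest alreadyCounted
    else
      let documentFrequency := countCharacterFrequency character document
      let charactersFrequency := countCharacterFrequency character characters
      if documentFrequency > charactersFrequency then false
      else generateDocumentIILoop characters document rest (PySem.Set.add alreadyCounted character)

def generateDocumentII (characters : String) (document : String) : Bool :=
  generateDocumentIILoop characters.toList document.toList document.toList PySem.Set.empty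

-- ===== PORT B =====
def generateDocumentII_alt (characters : String) (document : String) : Bool :=
  let available := PySem.Dict.counter characters.toList
  let needed := PySem.Dict.counter document.toList
  needed.items.all (fun kv => !(kv.2 > available.getD kv.1 0))

-- ===== PRECONDITION & SPEC =====
def Spec_generateDocumentII (characters : String) (document : String) (out : Bool) : Prop := out = generateDocumentII_alt characters document
instance (characters : String) (document : String) (out : Bool) : Decidable (Spec_generateDocumentII characters document out) := by unfold Spec_generateDocumentII; infer_instance

-- ===== CLAIM (what is proved, stated in full; the proofs are below) =====
def Claim_equal_generateDocumentII : Prop := ∀ (characters : String) (document : String), Dom_generateDocumentII characters document → Spec_generateDocumentII characters document (generateDocumentII characters document)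

-- ===== LEMMAS AND PROOFS =====

-- the per-character test both programs decide
def pvPass (characters document : List Char) (c : Char) : Bool :=
  decide ((document.count c : Int) ≤ (characters.count c : Int))

theorem countCharacterFrequency_foldl (c : Char) (t : List Char) (n : Int) :
    t.foldl (fun frequency char => if char == c then frequency + 1 else frequency) n
      = n + (t.count c : Int) := by
  induction t generalizing n with
  | nil => simp
  | cons a rest ih =>
      simp only [List.foldl_cons]
      by_cases h : a = c
      · rw [if_pos (by simp [h]), ih, List.count_cons]
        simp [h]; ring
      · rw [if_neg (by simp [h]), ih, List.count_cons]
        simp [h]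

theorem countCharacterFrequency_eq (c : Char) (t : List Char) :
    countCharacterFrequency c t = (t.count c : Int) := by
  unfold countCharacterFrequency
  rw [countCharacterFrequency_foldl]; ring

theorem loop_eq_all (characters document : List Char) (l : List Char)
    (s : PySem.Set Char) (hs : ∀ c ∈ s, pvPass characters document c = true) :
    generateDocumentIILoop characters document l s = l.all (pvPass characters document) := by
  induction l generalizing s with
  | nil => simp [generateDocumentIILoop]
  | cons c rest ih =>
      rw [generateDocumentIILoop]
      cases hcon : PySem.Set.contains s c with
      | true =>
          have hmem : c ∈ s := by simpa [PySem.Set.contains] using hcon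
          rw [if_pos rfl]
          simp [List.all_cons, hs c hmem, ih s hs]
      | false =>
          rw [if_neg (by simp)]
          rw [countCharacterFrequency_eq, countCharacterFrequency_eq]
          by_cases hgt : (document.count c : Int) > (characters.count c : Int)
          · have : pvPass characters document c = false := by
              simp [pvPass]; omega
            simp [hgt, List.all_cons, this]
          · have hp : pvPass characters document c = true := by
              simp [pvPass]; omega
            have hs' : ∀ x ∈ PySem.Set.add s c, pvPass characters document x = true := by
              intro x hx
              rcases (PySem.Set.mem_add _ _ _).mp hx with h | h
              · exact hs x h
              · subst h; exact hp
            simp [hgt, List.all_cons, hp, ih _ hs']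

theorem alt_eq_all (characters document : String) :
    generateDocumentII_alt characters document =
      document.toList.all (pvPass characters.toList document.toList) := by
  unfold generateDocumentII_alt
  simp only [PySem.Dict.items_counter, List.all_map]
  rcases Bool.eq_false_or_eq_true
      (document.toList.all (pvPass characters.toList document.toList)) with h | h
  · rw [h]
    rw [List.all_eq_true] at h ⊢
    intro x hx
    have := h x ((PySem.Set.mem_ofList _ _).mp hx)
    simp only [pvPass, decide_eq_true_eq] at this
    simp [PySem.Dict.getD_counter]
    omega
  · rw [h]
    rw [List.all_eq_false] at h ⊢
    obtain ⟨x, hx, hpx⟩ := h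
    refine ⟨x, (PySem.Set.mem_ofList _ _).mpr hx, ?_⟩
    simp [pvPass] at hpx
    simp [PySem.Dict.getD_counter]
    omega

-- ===== VERDICT (by name: the statement is the Claim_ definition above) =====
theorem generateDocumentII_spec : Claim_equal_generateDocumentII := by
  intro characters document _
  unfold Spec_generateDocumentII generateDocumentII
  rw [loop_eq_all _ _ _ PySem.Set.empty (by intro c hc; simp [PySem.Set.empty] at hc),
    alt_eq_all]
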